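-- pv_equiv track=rewrite | github.com/humancipher/Programming_Contest | Programming_Contest/AtCoder/ABC/ABC_230-239/ABC_239/ABC_239_E.py | dfs
-- ===== SOURCE A (Python) =====
-- from heapq import heapify,heappush,heappop
--
-- INF = 10**10
--
-- def dfs(G,D,X,now,par):
--     HQ = list()
--     heapify(HQ)
--     heappush(HQ,-X[now])
--     for nxt in G[now]:
--         if nxt != par:
--             HQC = dfs(G,D,X,nxt,now)
--             while len(HQC) > 0:
--                 x = heappop(HQC)
--                 if x != -INF:
--                     heappush(HQ,x)
--                 else:
--                     break
--     RHQ = list()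
--     cnt = 0
--     while len(RHQ) < 20 and len(HQ) > 0:
--         x = heappop(HQ)
--         heappush(RHQ,-abs(x))
--         D[now][cnt] = -abs(x)
--         cnt += 1
--     return RHQ
-- ===== SOURCE B (Python) =====
-- # B: per node, collect the values into a plain list and sort once, instead of merging
-- # through a priority queue; the returned (≤20-element) heap is still built with heappush
-- # so the returned list layout matches. Mutates D[now] exactly like A.
-- from heapq import heappush
--
-- INF = 10**10
--
-- def dfs(G, D, X, now, par):
--     vals = [-X[now]]
--     for nxt in G[now]:
--         if nxt != par:
--             child = dfs(G, D, X, nxt, now)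
--             for x in sorted(child):
--                 if x == -INF:
--                     break
--                 vals.append(x)
--     vals.sort()
--     RHQ = []
--     cnt = 0
--     for x in vals[:20]:
--         heappush(RHQ, -abs(x))
--         D[now][cnt] = -abs(x)
--         cnt += 1
--     return RHQ
-- ===== Notes on version B (the rewrite author's own statement) =====
-- stated objective: simpler
-- what changed: A merges each node's subtree values through a binary heap (heappush each value, then heappop the 20 smallest); B collects the values into a plain list, sorts it once, and takes the first 20 (the returned <=20-element list is still built with heappush so the returned heap layout is identical); B also reads each child's list with sorted() instead of destructively heappopping it.
import Mathlib
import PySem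

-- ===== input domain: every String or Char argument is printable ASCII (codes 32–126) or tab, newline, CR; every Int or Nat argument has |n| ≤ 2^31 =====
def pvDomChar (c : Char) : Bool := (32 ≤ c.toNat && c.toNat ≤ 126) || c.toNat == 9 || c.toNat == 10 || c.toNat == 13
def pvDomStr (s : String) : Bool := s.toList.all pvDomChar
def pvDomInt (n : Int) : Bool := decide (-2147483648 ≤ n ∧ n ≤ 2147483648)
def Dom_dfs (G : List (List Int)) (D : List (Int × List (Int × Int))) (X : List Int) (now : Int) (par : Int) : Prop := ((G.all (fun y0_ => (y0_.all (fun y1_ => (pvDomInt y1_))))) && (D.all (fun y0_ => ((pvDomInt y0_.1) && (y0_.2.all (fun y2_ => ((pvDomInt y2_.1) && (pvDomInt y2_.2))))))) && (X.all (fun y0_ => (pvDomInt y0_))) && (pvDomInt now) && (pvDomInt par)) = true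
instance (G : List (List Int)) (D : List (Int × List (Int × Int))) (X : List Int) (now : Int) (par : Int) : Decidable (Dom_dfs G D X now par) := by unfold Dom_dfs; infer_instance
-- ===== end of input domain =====

-- B replaces A's per-node priority-queue merge (heappush/heappop of every subtree value)
-- by collecting the values into a plain list and sorting it once; the returned ≤20-element
-- list is still built with heappush, so the returned list is identical.  Both Pythons
-- mutate the dict D identically (D is written, never read: the return value does not
-- depend on it); the equivalence proved here is about the return value.

-- ===== PORT A =====
-- Hand ports of CPython's heapq primitives (exact for int elements, including the
-- tie-breaking child choice in _siftup and the final _siftdown bubble-up).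

-- _siftdown(heap, startpos, pos) with newitem = item already stored at heap[pos];
-- pos strictly decreases each step, so pos is enough fuel (the 0-fuel arm is unreachable)
def hqBubbleUpA (fuel : Nat) (h : List Int) (startpos pos : Nat) (item : Int) : List Int :=
  match fuel with
  | 0 => h.set pos item
  | f + 1 =>
    if startpos < pos then
      let parentpos := (pos - 1) / 2
      let parent := h.getD parentpos 0
      if item < parent then hqBubbleUpA f (h.set pos parent) startpos parentpos item
      else h.set pos item
    else h.set pos item

def hqBubbleUp (h : List Int) (startpos pos : Nat) (item : Int) : List Int :=
  hqBubbleUpA pos h startpos pos item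

-- the descend-to-leaf loop of _siftup(heap, pos); returns (heap with children moved up,
-- leaf pos); pos strictly increases below h.length, so h.length - pos is enough fuel
def hqSiftupLoopA (fuel : Nat) (h : List Int) (pos : Nat) : List Int × Nat :=
  match fuel with
  | 0 => (h, pos)
  | f + 1 =>
    if 2 * pos + 1 < h.length then
      if 2 * pos + 2 < h.length ∧ ¬ h.getD (2 * pos + 1) 0 < h.getD (2 * pos + 2) 0 then
        hqSiftupLoopA f (h.set pos (h.getD (2 * pos + 2) 0)) (2 * pos + 2)
      else
        hqSiftupLoopA f (h.set pos (h.getD (2 * pos + 1) 0)) (2 * pos + 1)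
    else (h, pos)

def hqSiftupLoop (h : List Int) (pos : Nat) : List Int × Nat :=
  hqSiftupLoopA (h.length - pos) h pos

-- _siftup(heap, pos)
def hqSiftup (h : List Int) (pos : Nat) : List Int :=
  let item := h.getD pos 0
  let r := hqSiftupLoop h pos
  hqBubbleUp r.1 pos r.2 item

-- heappush(heap, x): append then _siftdown(heap, 0, len-1)
def hqPush (h : List Int) (x : Int) : List Int := hqBubbleUp (h ++ [x]) 0 h.length x

-- heapify(heap): for i in reversed(range(len//2)): _siftup(heap, i)
def hqHeapify (h : List Int) : List Int := ((List.range (h.length / 2)).reverse).foldl hqSiftup h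

-- heappop(heap); Python raises IndexError on []: never reached under A's len>0 guards
def hqPop (h : List Int) : Int × List Int :=
  match h with
  | [] => (0, [])
  | _ :: _ =>
    let lastelt := h.getLastD 0
    let rest := h.dropLast
    if rest.length = 0 then (lastelt, [])
    else (rest.getD 0 0, hqSiftup (rest.set 0 lastelt) 0)

-- A's inner while over the child's heap: pop, break on -INF, else push into HQ;
-- each pop shortens the heap by one, so hqc.length is enough fuel
def drainAA (fuel : Nat) (hqc HQ : List Int) : List Int :=
  match fuel with
  | 0 => HQ
  | f + 1 =>
    if 0 < hqc.length then
      if (hqPop hqc).1 ≠ -10000000000 then drainAA f (hqPop hqc).2 (hqPush HQ (hqPop hqc).1)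
      else HQ
    else HQ

def drainA (hqc HQ : List Int) : List Int := drainAA hqc.length hqc HQ

-- A's final while: pop up to 20 values, heappush -abs(x) onto RHQ
-- (the loop also writes D[now][cnt] = -abs(x); D is never read, so the writes are dropped)
def popPushLoopA (fuel : Nat) (HQ RHQ : List Int) : List Int :=
  match fuel with
  | 0 => RHQ
  | f + 1 =>
    if RHQ.length < 20 ∧ 0 < HQ.length then
      popPushLoopA f (hqPop HQ).2 (hqPush RHQ (-|(hqPop HQ).1|))
    else RHQ

def popPushLoop (HQ RHQ : List Int) : List Int := popPushLoopA HQ.length HQ RHQ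

-- the fueled body of A's dfs; fuel 0 is never reached on inputs satisfying Pre_dfs
def dfsF (G : List (List Int)) (X : List Int) (fuel : Nat) (now par : Int) : List Int :=
  match fuel with
  | 0 => []
  | fuel + 1 =>
    let HQ0 := hqHeapify []
    let HQ1 := hqPush HQ0 (-(PySem.List.pyGetD X now 0))
    let HQ2 := (PySem.List.pyGetD G now []).foldl
      (fun HQ nxt => if nxt ≠ par then drainA (dfsF G X fuel nxt now) HQ else HQ) HQ1
    popPushLoop HQ2 []

-- fuel bound: strictly more than the number of distinct recursion states (now', par'),
-- all of which are drawn from entries of G plus the two initial values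
def pvFuel (G : List (List Int)) : Nat :=
  ((G.map List.length).sum + 2) * ((G.map List.length).sum + 2) + 2

def dfs (G : List (List Int)) (D : List (Int × List (Int × Int))) (X : List Int) (now : Int) (par : Int) : List Int :=
  dfsF G X (pvFuel G) now par

-- ===== PORT B =====
-- for x in sorted(child): if x == -INF: break; vals.append(x)
def takeB : List Int → List Int
  | [] => []
  | x :: r => if x = -10000000000 then [] else x :: takeB r

-- for x in vals[:20]: heappush(RHQ, -abs(x))   (the D[now][cnt] writes are dropped, as in A)
def buildRHQ (vals : List Int) : List Int := vals.foldl (fun RHQ x => hqPush RHQ (-|x|)) []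

def dfsAltF (G : List (List Int)) (X : List Int) (fuel : Nat) (now par : Int) : List Int :=
  match fuel with
  | 0 => []
  | fuel + 1 =>
    let vals := (PySem.List.pyGetD G now []).foldl
      (fun vals nxt => if nxt ≠ par then
          vals ++ takeB (PySem.List.sorted (dfsAltF G X fuel nxt now) (fun x => x) false)
        else vals)
      [-(PySem.List.pyGetD X now 0)]
    buildRHQ ((PySem.List.sorted vals (fun x => x) false).take 20)

def dfs_alt (G : List (List Int)) (D : List (Int × List (Int × Int))) (X : List Int) (now : Int) (par : Int) : List Int :=
  dfsAltF G X (pvFuel G) now par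

-- ===== PRECONDITION & SPEC =====
-- One recursion step: from state (now', par') the call recurses into (nxt, now') for each
-- nxt ≠ par' in G[now']; it needs X[now'], G[now'] (IndexError) and the key now' in D (KeyError).
def pvSuccs (G : List (List Int)) (D : List (Int × List (Int × Int))) (X : List Int)
    (s : Int × Int) : Option (List (Int × Int)) :=
  match PySem.List.pyGet? G s.1, PySem.List.pyGet? X s.1 with
  | some adj, some _ =>
    if (D.lookup s.1).isSome then
      some ((adj.filter (fun nxt => nxt ≠ s.2)).map (fun nxt => (nxt, s.1)))
    else none
  | _, _ => none

def pvFrontier (G : List (List Int)) (D : List (Int × List (Int × Int))) (X : List Int) :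
    Nat → List (Int × Int) → Option (List (Int × Int))
  | 0, f => some f
  | k + 1, f =>
    match f.mapM (pvSuccs G D X) with
    | none => none
    | some ls => pvFrontier G D X k ls.flatten.dedup

-- Pre_dfs: Python's A returns normally exactly when every recursion state reachable from
-- (now, par) has valid X/G indices and its key in D, and the walk of states dies out (no
-- non-backtracking cycle, on which A would recurse forever).  Stated as: the set of states
-- reachable in exactly pvFuel G steps is empty and no reachable state is invalid
-- (pvFuel G exceeds the number of distinct states, so this is exact).
def Pre_dfs (G : List (List Int)) (D : List (Int × List (Int × Int))) (X : List Int) (now : Int) (par : Int) : Prop :=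
  pvFrontier G D X (pvFuel G) [(now, par)] = some []
instance (G : List (List Int)) (D : List (Int × List (Int × Int))) (X : List Int) (now : Int) (par : Int) : Decidable (Pre_dfs G D X now par) := by unfold Pre_dfs; infer_instance

def pvWitness_dfs : List (List Int) × (List (Int × List (Int × Int))) × List Int × Int × Int :=
  ([[1], [0]], [(0, []), (1, [])], [3, 5], 0, -1)

def Spec_dfs (G : List (List Int)) (D : List (Int × List (Int × Int))) (X : List Int) (now : Int) (par : Int) (out : List Int) : Prop := out = dfs_alt G D X now par
instance (G : List (List Int)) (D : List (Int × List (Int × Int))) (X : List Int) (now : Int) (par : Int) (out : List Int) : Decidable (Spec_dfs G D X now par out) := by unfold Spec_dfs; infer_instance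

-- ===== CLAIM (what is proved, stated in full; the proofs are below) =====
def Claim_equal_dfs : Prop := ∀ (G : List (List Int)) (D : List (Int × List (Int × Int))) (X : List Int) (now : Int) (par : Int), Dom_dfs G D X now par → Pre_dfs G D X now par → Spec_dfs G D X now par (dfs G D X now par)

-- ===== LEMMAS AND PROOFS =====
-- fuel arithmetic for the fueled loops: any sufficient fuel computes the same result
theorem hqBubbleUpA_length : ∀ (f : Nat) (h : List Int) (sp pos : Nat) (item : Int),
    (hqBubbleUpA f h sp pos item).length = h.length := by
  intro f
  induction f with
  | zero => intro h sp pos item; simp [hqBubbleUpA]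
  | succ f ih =>
    intro h sp pos item
    simp only [hqBubbleUpA]
    split_ifs <;> simp [ih]

theorem hqBubbleUp_length (h : List Int) (sp pos : Nat) (item : Int) :
    (hqBubbleUp h sp pos item).length = h.length := hqBubbleUpA_length pos h sp pos item

theorem hqSiftupLoopA_length : ∀ (f : Nat) (h : List Int) (pos : Nat),
    (hqSiftupLoopA f h pos).1.length = h.length := by
  intro f
  induction f with
  | zero => intro h pos; simp [hqSiftupLoopA]
  | succ f ih =>
    intro h pos
    simp only [hqSiftupLoopA]
    split_ifs <;> simp [ih]

theorem hqSiftupLoop_length (h : List Int) (pos : Nat) :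
    (hqSiftupLoop h pos).1.length = h.length := hqSiftupLoopA_length _ h pos

theorem hqSiftup_length (h : List Int) (pos : Nat) : (hqSiftup h pos).length = h.length := by
  unfold hqSiftup
  rw [hqBubbleUp_length, hqSiftupLoop_length]

theorem hqPop_length (h : List Int) (hne : 0 < h.length) : (hqPop h).2.length = h.length - 1 := by
  match h with
  | [] => simp at hne
  | a :: t =>
    simp only [hqPop]
    split
    · simp_all
    · simp_all [hqSiftup_length]

theorem hqBubbleUpA_congr : ∀ (f g : Nat) (h : List Int) (sp pos : Nat) (item : Int),
    pos ≤ f → pos ≤ g → hqBubbleUpA f h sp pos item = hqBubbleUpA g h sp pos item := by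
  intro f
  induction f with
  | zero =>
    intro g h sp pos item hf hg
    have hp : pos = 0 := by omega
    subst hp
    cases g with
    | zero => rfl
    | succ g => simp [hqBubbleUpA]
  | succ f ih =>
    intro g h sp pos item hf hg
    cases g with
    | zero =>
      have hp : pos = 0 := by omega
      subst hp
      simp [hqBubbleUpA]
    | succ g =>
      simp only [hqBubbleUpA]
      by_cases hsp : sp < pos
      · rw [if_pos hsp, if_pos hsp]
        by_cases hlt : item < h.getD ((pos - 1) / 2) 0
        · rw [if_pos hlt, if_pos hlt]
          exact ih g _ sp _ item (by omega) (by omega)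
        · rw [if_neg hlt, if_neg hlt]
      · rw [if_neg hsp, if_neg hsp]

theorem hqBubbleUp_eq (h : List Int) (sp pos : Nat) (item : Int) :
    hqBubbleUp h sp pos item =
      if sp < pos then
        (if item < h.getD ((pos - 1) / 2) 0 then
          hqBubbleUp (h.set pos (h.getD ((pos - 1) / 2) 0)) sp ((pos - 1) / 2) item
        else h.set pos item)
      else h.set pos item := by
  unfold hqBubbleUp
  cases pos with
  | zero => simp [hqBubbleUpA]
  | succ q =>
    simp only [hqBubbleUpA]
    by_cases hsp : sp < q + 1
    · rw [if_pos hsp, if_pos hsp]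
      by_cases hlt : item < h.getD ((q + 1 - 1) / 2) 0
      · rw [if_pos hlt, if_pos hlt]
        exact hqBubbleUpA_congr q ((q + 1 - 1) / 2) _ sp _ item (by omega) (by omega)
      · rw [if_neg hlt, if_neg hlt]
    · rw [if_neg hsp, if_neg hsp]

theorem hqSiftupLoopA_congr : ∀ (f g : Nat) (h : List Int) (pos : Nat),
    h.length - pos ≤ f → h.length - pos ≤ g → hqSiftupLoopA f h pos = hqSiftupLoopA g h pos := by
  intro f
  induction f with
  | zero =>
    intro g h pos hf hg
    have hc : ¬ 2 * pos + 1 < h.length := by omega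
    cases g with
    | zero => rfl
    | succ g => simp [hqSiftupLoopA, hc]
  | succ f ih =>
    intro g h pos hf hg
    cases g with
    | zero =>
      have hc : ¬ 2 * pos + 1 < h.length := by omega
      simp [hqSiftupLoopA, hc]
    | succ g =>
      simp only [hqSiftupLoopA]
      by_cases h1 : 2 * pos + 1 < h.length
      · rw [if_pos h1, if_pos h1]
        by_cases h2 : 2 * pos + 2 < h.length ∧ ¬ h.getD (2 * pos + 1) 0 < h.getD (2 * pos + 2) 0
        · rw [if_pos h2, if_pos h2]
          exact ih g _ _ (by simp; omega) (by simp; omega)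
        · rw [if_neg h2, if_neg h2]
          exact ih g _ _ (by simp; omega) (by simp; omega)
      · rw [if_neg h1, if_neg h1]

theorem hqSiftupLoop_eq (h : List Int) (pos : Nat) :
    hqSiftupLoop h pos =
      if 2 * pos + 1 < h.length then
        (if 2 * pos + 2 < h.length ∧ ¬ h.getD (2 * pos + 1) 0 < h.getD (2 * pos + 2) 0 then
          hqSiftupLoop (h.set pos (h.getD (2 * pos + 2) 0)) (2 * pos + 2)
        else
          hqSiftupLoop (h.set pos (h.getD (2 * pos + 1) 0)) (2 * pos + 1))
      else (h, pos) := by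
  by_cases h1 : 2 * pos + 1 < h.length
  · rw [if_pos h1]
    unfold hqSiftupLoop
    obtain ⟨n, hn⟩ : ∃ n, h.length - pos = n + 1 := ⟨h.length - pos - 1, by omega⟩
    rw [hn]
    simp only [hqSiftupLoopA]
    rw [if_pos h1]
    by_cases h2 : 2 * pos + 2 < h.length ∧ ¬ h.getD (2 * pos + 1) 0 < h.getD (2 * pos + 2) 0
    · rw [if_pos h2, if_pos h2]
      exact hqSiftupLoopA_congr n _ _ _ (by simp only [List.length_set]; omega) (le_refl _)
    · rw [if_neg h2, if_neg h2]
      exact hqSiftupLoopA_congr n _ _ _ (by simp only [List.length_set]; omega) (le_refl _)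
  · rw [if_neg h1]
    unfold hqSiftupLoop
    cases hf : h.length - pos with
    | zero => rfl
    | succ n =>
      simp only [hqSiftupLoopA]
      rw [if_neg h1]

theorem drainAA_congr : ∀ (f g : Nat) (hqc HQ : List Int),
    hqc.length ≤ f → hqc.length ≤ g → drainAA f hqc HQ = drainAA g hqc HQ := by
  intro f
  induction f with
  | zero =>
    intro g hqc HQ hf hg
    have hc : ¬ 0 < hqc.length := by omega
    cases g with
    | zero => rfl
    | succ g => simp [drainAA, hc]
  | succ f ih =>
    intro g hqc HQ hf hg
    cases g with
    | zero =>
      have hc : ¬ 0 < hqc.length := by omega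
      simp [drainAA, hc]
    | succ g =>
      simp only [drainAA]
      by_cases h1 : 0 < hqc.length
      · rw [if_pos h1, if_pos h1]
        by_cases h2 : (hqPop hqc).1 ≠ -10000000000
        · rw [if_pos h2, if_pos h2]
          exact ih g _ _ (by rw [hqPop_length _ h1]; omega) (by rw [hqPop_length _ h1]; omega)
        · rw [if_neg h2, if_neg h2]
      · rw [if_neg h1, if_neg h1]

theorem drainA_def (hqc HQ : List Int) :
    drainA hqc HQ =
      if 0 < hqc.length then
        (if (hqPop hqc).1 ≠ -10000000000 then drainA (hqPop hqc).2 (hqPush HQ (hqPop hqc).1)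
         else HQ)
      else HQ := by
  by_cases h1 : 0 < hqc.length
  · rw [if_pos h1]
    unfold drainA
    obtain ⟨n, hn⟩ : ∃ n, hqc.length = n + 1 := ⟨hqc.length - 1, by omega⟩
    rw [hn]
    simp only [drainAA]
    rw [if_pos h1]
    by_cases h2 : (hqPop hqc).1 ≠ -10000000000
    · rw [if_pos h2, if_pos h2]
      exact drainAA_congr n _ _ _ (by rw [hqPop_length _ h1]; omega) (le_refl _)
    · rw [if_neg h2, if_neg h2]
  · rw [if_neg h1]
    unfold drainA
    cases hf : hqc.length with
    | zero => rfl
    | succ n =>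
      simp only [drainAA]
      rw [if_neg h1]

theorem popPushLoopA_congr : ∀ (f g : Nat) (HQ RHQ : List Int),
    HQ.length ≤ f → HQ.length ≤ g → popPushLoopA f HQ RHQ = popPushLoopA g HQ RHQ := by
  intro f
  induction f with
  | zero =>
    intro g HQ RHQ hf hg
    have hc : ¬ (RHQ.length < 20 ∧ 0 < HQ.length) := by omega
    cases g with
    | zero => rfl
    | succ g => simp only [popPushLoopA]; rw [if_neg hc]
  | succ f ih =>
    intro g HQ RHQ hf hg
    cases g with
    | zero =>
      have hc : ¬ (RHQ.length < 20 ∧ 0 < HQ.length) := by omega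
      simp only [popPushLoopA]; rw [if_neg hc]
    | succ g =>
      simp only [popPushLoopA]
      by_cases h1 : RHQ.length < 20 ∧ 0 < HQ.length
      · rw [if_pos h1, if_pos h1]
        exact ih g _ _ (by rw [hqPop_length _ h1.2]; omega) (by rw [hqPop_length _ h1.2]; omega)
      · rw [if_neg h1, if_neg h1]

theorem popPushLoop_def (HQ RHQ : List Int) :
    popPushLoop HQ RHQ =
      if RHQ.length < 20 ∧ 0 < HQ.length then
        popPushLoop (hqPop HQ).2 (hqPush RHQ (-|(hqPop HQ).1|))
      else RHQ := by
  by_cases h1 : RHQ.length < 20 ∧ 0 < HQ.length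
  · rw [if_pos h1]
    unfold popPushLoop
    obtain ⟨n, hn⟩ : ∃ n, HQ.length = n + 1 := ⟨HQ.length - 1, by omega⟩
    rw [hn]
    simp only [popPushLoopA]
    rw [if_pos h1]
    exact popPushLoopA_congr n _ _ _ (by rw [hqPop_length _ h1.2]; omega) (le_refl _)
  · rw [if_neg h1]
    unfold popPushLoop
    cases hf : HQ.length with
    | zero => rfl
    | succ n =>
      simp only [popPushLoopA]
      rw [if_neg h1]

-- getD after set, fully case-split
theorem getD_set_ite (l : List Int) (i j : Nat) (a : Int) :
    (l.set i a).getD j 0 = if i = j ∧ i < l.length then a else l.getD j 0 := by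
  simp only [List.getD, List.getElem?_set]
  by_cases hij : i = j
  · subst hij
    by_cases hi : i < l.length <;> simp [hi]
  · simp [hij]

theorem set_getD_self (l : List Int) (i : Nat) (hi : i < l.length) :
    l.set i (l.getD i 0) = l := by
  simp [List.getD, List.getElem?_eq_getElem hi]

-- extracting position m: (t[m] :: t.set m y) is a rearrangement of (y :: t)
theorem set_perm_cons (t : List Int) (m : Nat) (y : Int) (hm : m < t.length) :
    (t.getD m 0 :: t.set m y).Perm (y :: t) := by
  induction t generalizing m with
  | nil => simp at hm
  | cons a s ih =>
    cases m with
    | zero => simpa using List.Perm.swap y a s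
    | succ m =>
      have h1 : ((a :: s).getD (m+1) 0 :: (a :: s).set (m+1) y) = s.getD m 0 :: a :: s.set m y := by
        simp [List.getD]
      rw [h1]
      have p1 : (s.getD m 0 :: a :: s.set m y).Perm (a :: s.getD m 0 :: s.set m y) :=
        List.Perm.swap a (s.getD m 0) (s.set m y)
      have p2 : (a :: s.getD m 0 :: s.set m y).Perm (a :: y :: s) :=
        (ih m (by simpa using hm)).cons a
      have p3 : (a :: y :: s).Perm (y :: a :: s) := List.Perm.swap y a s
      exact (p1.trans p2).trans p3

-- overwriting i with l[j] then j with x permutes to overwriting i with x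
theorem perm_set_set (g : List Int) (i j : Nat) (x : Int) (hij : i ≠ j)
    (hi : i < g.length) (hj : j < g.length) :
    ((g.set i (g.getD j 0)).set j x).Perm (g.set i x) := by
  induction g generalizing i j with
  | nil => simp at hi
  | cons a t ih =>
    cases i with
    | zero =>
      cases j with
      | zero => omega
      | succ k =>
        have h1 : ((a :: t).set 0 ((a :: t).getD (k+1) 0)).set (k+1) x
            = t.getD k 0 :: t.set k x := by simp [List.getD]
        rw [h1]
        exact set_perm_cons t k x (by simpa using hj)
    | succ k =>
      cases j with
      | zero =>
        have h1 : ((a :: t).set (k+1) ((a :: t).getD 0 0)).set 0 x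
            = x :: t.set k a := by simp [List.getD]
        have h2 : (a :: t).set (k+1) x = a :: t.set k x := by simp
        rw [h1, h2]
        have hk : k < t.length := by simpa using hi
        have c := t.getD k 0
        have p1 : (t.getD k 0 :: t.set k a).Perm (a :: t) := set_perm_cons t k a hk
        have p2 : (t.getD k 0 :: t.set k x).Perm (x :: t) := set_perm_cons t k x hk
        -- x :: t.set k a  ~  a :: t.set k x
        have q1 : (x :: t.getD k 0 :: t.set k a).Perm (x :: a :: t) := p1.cons x
        have q2 : (x :: a :: t).Perm (a :: x :: t) := List.Perm.swap _ _ _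
        have q3 : (a :: x :: t).Perm (a :: t.getD k 0 :: t.set k x) := (p2.symm).cons a
        have q4 : (a :: t.getD k 0 :: t.set k x).Perm (t.getD k 0 :: a :: t.set k x) :=
          List.Perm.swap _ _ _
        have q5 : (x :: t.getD k 0 :: t.set k a).Perm (t.getD k 0 :: a :: t.set k x) :=
          ((q1.trans q2).trans q3).trans q4
        have q6 : (t.getD k 0 :: x :: t.set k a).Perm (t.getD k 0 :: a :: t.set k x) :=
          (List.Perm.swap _ _ _).trans q5
        exact q6.cons_inv
      | succ m =>
        have h1 : ((a :: t).set (k+1) ((a :: t).getD (m+1) 0)).set (m+1) x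
            = a :: (t.set k (t.getD m 0)).set m x := by simp [List.getD]
        have h2 : (a :: t).set (k+1) x = a :: t.set k x := by simp
        rw [h1, h2]
        exact (ih k m (by omega) (by simpa using hi) (by simpa using hj)).cons a

-- the heap invariant: every parent is ≤ its children
def HInv (h : List Int) : Prop :=
  ∀ i j : Nat, j < h.length → (j = 2*i+1 ∨ j = 2*i+2) → h.getD i 0 ≤ h.getD j 0

theorem hinv_nil : HInv [] := by intro i j hj _; simp at hj

theorem hinv_singleton (v : Int) : HInv [v] := by
  intro i j hj hc
  simp only [List.length_cons, List.length_nil] at hj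
  omega

theorem hqBubbleUp_set_self (h : List Int) (sp pos : Nat) (item : Int) :
    hqBubbleUp h sp pos item = hqBubbleUp (h.set pos item) sp pos item := by
  conv_lhs => rw [hqBubbleUp_eq]
  conv_rhs => rw [hqBubbleUp_eq]
  by_cases hsp : sp < pos
  · have hne : ¬ (pos = (pos - 1) / 2 ∧ pos < h.length) := by
      intro hh; omega
    simp only [hsp, if_true, getD_set_ite, hne, if_false, List.set_set]
  · simp [hsp, List.set_set]

theorem hqBubbleUp_spec :
    ∀ (pos : Nat) (g : List Int), pos < g.length →
    (∀ i j : Nat, j < g.length → (j = 2*i+1 ∨ j = 2*i+2) → j ≠ pos → g.getD i 0 ≤ g.getD j 0) →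
    (∀ j : Nat, 0 < pos → (j = 2*pos+1 ∨ j = 2*pos+2) → j < g.length →
        g.getD ((pos-1)/2) 0 ≤ g.getD j 0) →
    HInv (hqBubbleUp g 0 pos (g.getD pos 0)) ∧ (hqBubbleUp g 0 pos (g.getD pos 0)).Perm g := by
  intro pos
  induction pos using Nat.strong_induction_on with
  | _ pos IH =>
    intro g hpos hexc hgp
    rw [hqBubbleUp_eq]
    by_cases h0 : 0 < pos
    · simp only [h0, if_true]
      set pp := (pos - 1) / 2 with hpp
      have hpplt : pp < pos := by omega
      by_cases hlt : g.getD pos 0 < g.getD pp 0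
      · simp only [hlt, if_true]
        -- recursive case: the hole moves to pp
        set parent := g.getD pp 0 with hparent
        set item := g.getD pos 0 with hitem
        set g' := (g.set pos parent).set pp item with hg'
        have hlen' : g'.length = g.length := by simp [hg']
        have e_pp : g'.getD pp 0 = item := by
          rw [hg', getD_set_ite]
          simp only [List.length_set]
          simp [show pp < g.length by omega]
        have e_pos : g'.getD pos 0 = parent := by
          rw [hg', getD_set_ite, getD_set_ite]
          simp only [List.length_set]
          have h1 : ¬ (pp = pos ∧ pp < g.length) := by omega
          simp [h1, hpos]
        have e_oth : ∀ k : Nat, k ≠ pp → k ≠ pos → g'.getD k 0 = g.getD k 0 := by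
          intro k h1 h2
          rw [hg', getD_set_ite, getD_set_ite]
          simp only [List.length_set]
          have h1' : ¬ (pp = k ∧ pp < g.length) := fun hh => h1 hh.1.symm
          have h2' : ¬ (pos = k ∧ pos < g.length) := fun hh => h2 hh.1.symm
          simp [h1', h2']
        have hstep : hqBubbleUp (g.set pos parent) 0 pp item = hqBubbleUp g' 0 pp (g'.getD pp 0) := by
          rw [hqBubbleUp_set_self (g.set pos parent) 0 pp item, hg', e_pp]
        rw [hstep]
        have hpppos : pp < g'.length := by omega
        -- transfer the two hypotheses to (g', pp)
        have hexc' : ∀ i j : Nat, j < g'.length → (j = 2*i+1 ∨ j = 2*i+2) → j ≠ pp →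
            g'.getD i 0 ≤ g'.getD j 0 := by
          intro i j hj hc hjpp
          rw [hlen'] at hj
          have hij : i = (j-1)/2 := by omega
          by_cases hjpos : j = pos
          · -- the edge (pp, pos)
            have hippp : i = pp := by omega
            rw [hippp, hjpos, e_pp, e_pos]
            exact le_of_lt hlt
          · by_cases hipp : i = pp
            · -- item at pp vs untouched child j of pp, j ≠ pos
              rw [hipp, e_pp, e_oth j (fun hh => hjpp hh) hjpos]
              have := hexc pp j hj (by omega) hjpos
              exact le_of_lt (lt_of_lt_of_le hlt this)
            · by_cases hipos : i = pos
              · -- parent at pos vs untouched child j of pos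
                rw [hipos, e_pos, e_oth j (fun hh => hjpp hh) hjpos]
                exact hgp j h0 (by omega) hj
              · rw [e_oth i hipp hipos, e_oth j (fun hh => hjpp hh) hjpos]
                exact hexc i j hj hc hjpos
        have hgp' : ∀ j : Nat, 0 < pp → (j = 2*pp+1 ∨ j = 2*pp+2) → j < g'.length →
            g'.getD ((pp-1)/2) 0 ≤ g'.getD j 0 := by
          intro j hpp0 hc hj
          rw [hlen'] at hj
          set ppp := (pp - 1) / 2 with hppp
          have hppplt : ppp < pp := by omega
          rw [e_oth ppp (by omega) (by omega)]
          have hedge : g.getD ppp 0 ≤ g.getD pp 0 := by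
            refine hexc ppp pp (by omega) (by omega) (by omega)
          by_cases hjpos : j = pos
          · rw [hjpos, e_pos]
            exact hedge
          · rw [e_oth j (by omega) hjpos]
            exact le_trans hedge (hexc pp j hj (by omega) hjpos)
        obtain ⟨ha, hb⟩ := IH pp hpplt g' hpppos hexc' hgp'
        refine ⟨ha, hb.trans ?_⟩
        -- g' ~ g: the two writes are a swap of positions pos and pp
        have hps := perm_set_set g pos pp (g.getD pos 0) (by omega) hpos (by omega)
        rw [set_getD_self g pos hpos] at hps
        exact hps
      · simp only [hlt, if_false]
        rw [set_getD_self g pos hpos]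
        constructor
        · intro i j hj hc
          by_cases hjpos : j = pos
          · have : i = pp := by omega
            subst this; subst hjpos
            exact le_of_not_gt hlt
          · exact hexc i j hj hc hjpos
        · exact List.Perm.refl g
    · have hpos0 : pos = 0 := by omega
      subst hpos0
      rw [if_neg (by omega), set_getD_self g 0 hpos]
      refine ⟨?_, List.Perm.refl g⟩
      intro i j hj hc
      exact hexc i j hj hc (by omega)

theorem getD_append_lt (h : List Int) (x : Int) (k : Nat) (hk : k < h.length) :
    (h ++ [x]).getD k 0 = h.getD k 0 := by
  simp [List.getD, List.getElem?_append_left hk]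

theorem hqPush_spec (h : List Int) (x : Int) (hinv : HInv h) :
    HInv (hqPush h x) ∧ (hqPush h x).Perm (x :: h) := by
  unfold hqPush
  have hlen : (h ++ [x]).length = h.length + 1 := by simp
  have hgd : (h ++ [x]).getD h.length 0 = x := by
    simp [List.getD]
  have hexc : ∀ i j : Nat, j < (h ++ [x]).length → (j = 2*i+1 ∨ j = 2*i+2) → j ≠ h.length →
      (h ++ [x]).getD i 0 ≤ (h ++ [x]).getD j 0 := by
    intro i j hj hc hjne
    rw [hlen] at hj
    have hjlt : j < h.length := by omega
    have hilt : i < h.length := by omega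
    rw [getD_append_lt _ _ _ hjlt, getD_append_lt _ _ _ hilt]
    exact hinv i j hjlt hc
  have hgp : ∀ j : Nat, 0 < h.length → (j = 2*h.length+1 ∨ j = 2*h.length+2) →
      j < (h ++ [x]).length → (h ++ [x]).getD ((h.length-1)/2) 0 ≤ (h ++ [x]).getD j 0 := by
    intro j h0 hc hj
    rw [hlen] at hj; omega
  have := hqBubbleUp_spec h.length (h ++ [x]) (by omega) hexc hgp
  rw [hgd] at this
  exact ⟨this.1, this.2.trans (List.perm_append_singleton x h)⟩

theorem hqSiftupLoop_spec :
    ∀ (fuel : Nat) (g : List Int) (pos : Nat), g.length - pos ≤ fuel → pos < g.length →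
    (∀ i j : Nat, j < g.length → (j = 2*i+1 ∨ j = 2*i+2) → i ≠ pos → g.getD i 0 ≤ g.getD j 0) →
    (∀ j : Nat, 0 < pos → (j = 2*pos+1 ∨ j = 2*pos+2) → j < g.length →
        g.getD ((pos-1)/2) 0 ≤ g.getD j 0) →
    (hqSiftupLoop g pos).1.length = g.length ∧ (hqSiftupLoop g pos).2 < g.length ∧
    ¬ (2 * (hqSiftupLoop g pos).2 + 1 < g.length) ∧
    (∀ i j : Nat, j < g.length → (j = 2*i+1 ∨ j = 2*i+2) → i ≠ (hqSiftupLoop g pos).2 →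
        (hqSiftupLoop g pos).1.getD i 0 ≤ (hqSiftupLoop g pos).1.getD j 0) ∧
    (∀ x : Int, ((hqSiftupLoop g pos).1.set (hqSiftupLoop g pos).2 x).Perm (g.set pos x)) := by
  intro fuel
  induction fuel with
  | zero =>
    intro g pos hfuel hpos _ _
    omega
  | succ fuel IH =>
    intro g pos hfuel hpos hP1 hP2
    rw [hqSiftupLoop_eq]
    by_cases h1 : 2 * pos + 1 < g.length
    · rw [if_pos h1]
      -- child selection
      set c1 := 2 * pos + 1 with hc1
      set c2 := 2 * pos + 2 with hc2
      have hsel : ∀ (cs : Nat), (cs = c2 ∧ c2 < g.length ∧ ¬ g.getD c1 0 < g.getD c2 0) ∨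
          (cs = c1 ∧ (c2 < g.length → g.getD c1 0 < g.getD c2 0)) →
          -- chosen child cs is minimal among existing children, and the step is valid
          (g.getD cs 0 ≤ g.getD c1 0 ∧ (c2 < g.length → g.getD cs 0 ≤ g.getD c2 0) ∧ cs < g.length) →
          (hqSiftupLoop (g.set pos (g.getD cs 0)) cs).1.length = g.length ∧
          (hqSiftupLoop (g.set pos (g.getD cs 0)) cs).2 < g.length ∧
          ¬ (2 * (hqSiftupLoop (g.set pos (g.getD cs 0)) cs).2 + 1 < g.length) ∧
          (∀ i j : Nat, j < g.length → (j = 2*i+1 ∨ j = 2*i+2) →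
              i ≠ (hqSiftupLoop (g.set pos (g.getD cs 0)) cs).2 →
              (hqSiftupLoop (g.set pos (g.getD cs 0)) cs).1.getD i 0 ≤
              (hqSiftupLoop (g.set pos (g.getD cs 0)) cs).1.getD j 0) ∧
          (∀ x : Int, ((hqSiftupLoop (g.set pos (g.getD cs 0)) cs).1.set
              (hqSiftupLoop (g.set pos (g.getD cs 0)) cs).2 x).Perm (g.set pos x)) := by
        intro cs hcase hmin
        obtain ⟨hminc1, hminc2, hcslt⟩ := hmin
        have hcsgt : pos < cs := by rcases hcase with ⟨h,_⟩|⟨h,_⟩ <;> omega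
        have hcschild : cs = 2*pos+1 ∨ cs = 2*pos+2 := by
          rcases hcase with ⟨h,_⟩|⟨h,_⟩ <;> omega
        set g1 := g.set pos (g.getD cs 0) with hg1
        have hlen1 : g1.length = g.length := by simp [hg1]
        have e1 : g1.getD pos 0 = g.getD cs 0 := by
          rw [hg1, getD_set_ite]; simp [hpos]
        have e2 : ∀ k : Nat, k ≠ pos → g1.getD k 0 = g.getD k 0 := by
          intro k hk
          rw [hg1, getD_set_ite]
          have : ¬ (pos = k ∧ pos < g.length) := fun hh => hk hh.1.symm
          simp [this]
        have hP1' : ∀ i j : Nat, j < g1.length → (j = 2*i+1 ∨ j = 2*i+2) → i ≠ cs →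
            g1.getD i 0 ≤ g1.getD j 0 := by
          intro i j hj hc hics
          rw [hlen1] at hj
          have hij : i = (j-1)/2 := by omega
          by_cases hipos : i = pos
          · -- children of pos
            have hjc : j = c1 ∨ j = c2 := by omega
            have hjnpos : j ≠ pos := by omega
            rw [hipos, e1, e2 j hjnpos]
            rcases hjc with hjc | hjc
            · rw [hjc]; exact hminc1
            · rw [hjc]; exact hminc2 (by omega)
          · by_cases hjpos : j = pos
            · -- edge (parent pos, pos): new value g[cs]
              have hipp : i = (pos-1)/2 := by omega
              rw [hjpos, e1, e2 i hipos, hipp]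
              refine hP2 cs (by omega) hcschild hcslt
            · rw [e2 i hipos, e2 j hjpos]
              exact hP1 i j hj hc (by omega)
        have hP2' : ∀ j : Nat, 0 < cs → (j = 2*cs+1 ∨ j = 2*cs+2) → j < g1.length →
            g1.getD ((cs-1)/2) 0 ≤ g1.getD j 0 := by
          intro j _ hc hj
          rw [hlen1] at hj
          have hpar : (cs-1)/2 = pos := by omega
          have hjne : j ≠ pos := by omega
          rw [hpar, e1, e2 j hjne]
          exact hP1 cs j hj (by omega) (by omega)
        have hrec := IH g1 cs (by omega) (by omega) hP1' hP2'
        rw [hlen1] at hrec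
        obtain ⟨ra, rb, rc, rd, re⟩ := hrec
        refine ⟨ra, rb, rc, rd, ?_⟩
        intro x
        have := re x
        refine this.trans ?_
        rw [hg1]
        exact perm_set_set g pos cs x (by omega) hpos hcslt
      by_cases h2 : 2 * pos + 2 < g.length ∧ ¬ g.getD (2*pos+1) 0 < g.getD (2*pos+2) 0
      · rw [if_pos h2]
        exact hsel (2*pos+2) (Or.inl ⟨rfl, h2.1, h2.2⟩)
          ⟨le_of_not_gt h2.2, fun _ => le_refl _, h2.1⟩
      · rw [if_neg h2]
        have hcond : 2*pos+2 < g.length → g.getD (2*pos+1) 0 < g.getD (2*pos+2) 0 := by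
          intro hlt
          by_contra hge
          exact h2 ⟨hlt, hge⟩
        exact hsel (2*pos+1) (Or.inr ⟨rfl, hcond⟩)
          ⟨le_refl _, fun hlt => le_of_lt (hcond hlt), h1⟩
    · rw [if_neg h1]
      exact ⟨rfl, hpos, h1, fun i j hj hc hip => hP1 i j hj hc hip, fun x => List.Perm.refl _⟩

theorem hqSiftup_zero_spec (g : List Int) (hne : 0 < g.length)
    (hexc : ∀ i j : Nat, j < g.length → (j = 2*i+1 ∨ j = 2*i+2) → i ≠ 0 → g.getD i 0 ≤ g.getD j 0) :
    HInv (hqSiftup g 0) ∧ (hqSiftup g 0).Perm g := by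
  unfold hqSiftup
  obtain ⟨ra, rb, rc, rd, re⟩ := hqSiftupLoop_spec (g.length) g 0 (by omega) hne
    (fun i j hj hc hi0 => hexc i j hj hc hi0)
    (fun j h0 _ _ => by omega)
  set r := hqSiftupLoop g 0 with hr
  set item := g.getD 0 0 with hitem
  -- rewrite the final bubble-up over the hole as a bubble-up over the filled list
  rw [hqBubbleUp_set_self r.1 0 r.2 item]
  set g2 := r.1.set r.2 item with hg2
  have hlen2 : g2.length = g.length := by simp [hg2, ra]
  have e_hole : g2.getD r.2 0 = item := by
    rw [hg2, getD_set_ite]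
    simp [ra, rb]
  have e_oth2 : ∀ k : Nat, k ≠ r.2 → g2.getD k 0 = r.1.getD k 0 := by
    intro k hk
    rw [hg2, getD_set_ite]
    have : ¬ (r.2 = k ∧ r.2 < r.1.length) := fun hh => hk hh.1.symm
    simp [this]
  have hexc2 : ∀ i j : Nat, j < g2.length → (j = 2*i+1 ∨ j = 2*i+2) → j ≠ r.2 →
      g2.getD i 0 ≤ g2.getD j 0 := by
    intro i j hj hc hjr
    rw [hlen2] at hj
    have hij : i ≠ r.2 := by
      intro hh
      -- i = r.2 would make j an in-range child of the leaf r.2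
      rcases hc with hc | hc <;> omega
    rw [e_oth2 i hij, e_oth2 j hjr]
    exact rd i j hj hc hij
  have hgp2 : ∀ j : Nat, 0 < r.2 → (j = 2*r.2+1 ∨ j = 2*r.2+2) → j < g2.length →
      g2.getD ((r.2-1)/2) 0 ≤ g2.getD j 0 := by
    intro j _ hc hj
    rw [hlen2] at hj
    rcases hc with hc | hc <;> omega
  have := hqBubbleUp_spec r.2 g2 (by omega) hexc2 hgp2
  rw [e_hole] at this
  refine ⟨this.1, this.2.trans ?_⟩
  rw [hg2]
  have := re item
  rw [hitem] at this
  exact this.trans (by rw [set_getD_self g 0 hne])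

theorem hinv_root_min (h : List Int) (hinv : HInv h) :
    ∀ j : Nat, j < h.length → h.getD 0 0 ≤ h.getD j 0 := by
  intro j
  induction j using Nat.strong_induction_on with
  | _ j IH =>
    intro hj
    cases j with
    | zero => exact le_refl _
    | succ m =>
      have hpar : (m + 1) = 2 * (m / 2) + 1 ∨ (m + 1) = 2 * (m / 2) + 2 := by omega
      have h1 : h.getD (m / 2) 0 ≤ h.getD (m + 1) 0 := hinv (m / 2) (m + 1) hj hpar
      have h2 : h.getD 0 0 ≤ h.getD (m / 2) 0 := IH (m / 2) (by omega) (by omega)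
      exact le_trans h2 h1

theorem hqPop_spec (h : List Int) (hne : 0 < h.length) (hinv : HInv h) :
    (hqPop h).1 = h.getD 0 0 ∧ HInv (hqPop h).2 ∧ ((hqPop h).1 :: (hqPop h).2).Perm h := by
  match h with
  | [] => simp at hne
  | a :: t =>
    simp only [hqPop]
    by_cases hlen : (a :: t).dropLast.length = 0
    · -- singleton: dropLast = [], so t = []
      have ht : t = [] := by
        have h1 : (a :: t).dropLast.length = (a :: t).length - 1 := List.length_dropLast
        rw [hlen] at h1
        simp only [List.length_cons] at h1
        exact List.eq_nil_of_length_eq_zero (by omega)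
      subst ht
      simp [List.getD, hinv_nil]
    · rw [if_neg hlen]
      set rest := (a :: t).dropLast with hrest
      set last := (a :: t).getLastD 0 with hlast
      have hrl : rest.length = t.length := by simp [hrest]
      have hrlpos : 0 < rest.length := by
        rw [hrest] at hlen ⊢; omega
      have e_rest : ∀ k : Nat, k < rest.length → rest.getD k 0 = (a :: t).getD k 0 := by
        intro k hk
        have hk1 : k < (a :: t).dropLast.length := hk
        have hk2 : k < (a :: t).length := by
          simp only [List.length_dropLast, List.length_cons] at hk1
          simp only [List.length_cons]
          omega
        rw [hrest]
        simp only [List.getD]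
        rw [List.getElem?_eq_getElem hk1, List.getElem?_eq_getElem hk2]
        simp [List.getElem_dropLast]
      set g := rest.set 0 last with hg
      have hglen : g.length = rest.length := by simp [hg]
      have hexc : ∀ i j : Nat, j < g.length → (j = 2*i+1 ∨ j = 2*i+2) → i ≠ 0 →
        g.getD i 0 ≤ g.getD j 0 := by
        intro i j hj hc hi0
        rw [hglen] at hj
        have hjne : j ≠ 0 := by omega
        have ei : g.getD i 0 = (a :: t).getD i 0 := by
          rw [hg, getD_set_ite]
          have : ¬ ((0:Nat) = i ∧ 0 < rest.length) := fun hh => hi0 hh.1.symm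
          rw [if_neg this]
          exact e_rest i (by omega)
        have ej : g.getD j 0 = (a :: t).getD j 0 := by
          rw [hg, getD_set_ite]
          have : ¬ ((0:Nat) = j ∧ 0 < rest.length) := fun hh => hjne hh.1.symm
          rw [if_neg this]
          exact e_rest j hj
        rw [ei, ej]
        exact hinv i j (by rw [hrl] at hj; simp; omega) hc
      obtain ⟨hi2, hp2⟩ := hqSiftup_zero_spec g (by omega) hexc
      refine ⟨?_, hi2, ?_⟩
      · -- returned value is the root
        rw [e_rest 0 hrlpos]
      · -- permutation: root :: rest-with-last-at-0 ~ original
        have hsplit : rest ++ [last] = a :: t := by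
          have h1 : (a :: t).getLastD 0 = (a :: t).getLast (by simp) := by
            rw [List.getLastD_eq_getLast?, List.getLast?_eq_some_getLast (by simp)]
            rfl
          rw [hrest, hlast, h1]
          exact List.dropLast_append_getLast _
        -- rest = r0 :: rt
        obtain ⟨r0, rt, hr0⟩ : ∃ r0 rt, rest = r0 :: rt := by
          cases hrest' : rest with
          | nil => rw [hrest'] at hrlpos; simp at hrlpos
          | cons r0 rt => exact ⟨r0, rt, rfl⟩
        have hg0 : rest.getD 0 0 = r0 := by rw [hr0]; rfl
        have hgset : g = last :: rt := by rw [hg, hr0]; rfl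
        rw [hg0]
        refine (List.Perm.cons r0 (hp2.trans (by rw [hgset]))).trans ?_
        have : (r0 :: last :: rt).Perm (r0 :: (rt ++ [last])) :=
          (List.perm_append_singleton last rt).symm.cons r0
        refine this.trans ?_
        have : r0 :: (rt ++ [last]) = (r0 :: rt) ++ [last] := rfl
        rw [this, ← hr0, hsplit]

-- the full heap-pop sequence (proof-side only)
def popSeq (h : List Int) : List Int :=
  if hh : 0 < h.length then (hqPop h).1 :: popSeq (hqPop h).2 else []
termination_by h.length
decreasing_by rw [hqPop_length _ hh]; omega

theorem popSeq_perm_pairwise : ∀ (n : Nat) (h : List Int), h.length ≤ n → HInv h →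
    (popSeq h).Perm h ∧ (popSeq h).Pairwise (· ≤ ·) := by
  intro n
  induction n with
  | zero =>
    intro h hn _
    have he : h = [] := List.length_eq_zero_iff.mp (by omega)
    subst he
    rw [popSeq, dif_neg (by simp)]
    exact ⟨List.Perm.refl [], List.Pairwise.nil⟩
  | succ n IHn =>
    intro h hn hinv
    rw [popSeq]
    by_cases hh : 0 < h.length
    · rw [dif_pos hh]
      obtain ⟨hv, hi', hp⟩ := hqPop_spec h hh hinv
      obtain ⟨ih1, ih2⟩ := IHn (hqPop h).2 (by rw [hqPop_length _ hh]; omega) hi'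
      constructor
      · exact (ih1.cons (hqPop h).1).trans hp
      · refine List.Pairwise.cons ?_ ih2
        intro y hy
        have hy2 : y ∈ (hqPop h).2 := ih1.mem_iff.mp hy
        have hyh : y ∈ h := hp.mem_iff.mp (List.mem_cons_of_mem _ hy2)
        obtain ⟨k, hk, hyk⟩ := List.mem_iff_getElem.mp hyh
        rw [hv]
        have : h.getD k 0 = y := by simp [List.getD, List.getElem?_eq_getElem hk, hyk]
        rw [← this]
        exact hinv_root_min h hinv k hk
    · rw [dif_neg hh]
      have he : h = [] := List.length_eq_zero_iff.mp (by omega)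
      subst he
      exact ⟨List.Perm.refl [], List.Pairwise.nil⟩

theorem popSeq_eq_sorted (h : List Int) (hinv : HInv h) :
    popSeq h = PySem.List.sorted h (fun x => x) false := by
  obtain ⟨hp, hpw⟩ := popSeq_perm_pairwise h.length h le_rfl hinv
  exact (PySem.List.sorted_id_eq_of_perm_of_pairwise h (popSeq h) hp hpw).symm

theorem drainA_eq_aux : ∀ (n : Nat) (hqc HQ : List Int), hqc.length ≤ n →
    drainA hqc HQ = (takeB (popSeq hqc)).foldl hqPush HQ := by
  intro n
  induction n with
  | zero =>
    intro hqc HQ hn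
    have he : hqc = [] := List.length_eq_zero_iff.mp (by omega)
    subst he
    rw [drainA_def, popSeq]
    simp [takeB]
  | succ n IHn =>
    intro hqc HQ hn
    rw [drainA_def, popSeq]
    by_cases hh : 0 < hqc.length
    · rw [if_pos hh, dif_pos hh, takeB]
      by_cases hx : (hqPop hqc).1 = -10000000000
      · rw [if_neg (by simp [hx]), if_pos hx]
        simp
      · rw [if_pos hx, if_neg hx, List.foldl_cons]
        exact IHn (hqPop hqc).2 (hqPush HQ (hqPop hqc).1) (by rw [hqPop_length _ hh]; omega)
    · rw [if_neg hh, dif_neg hh]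
      simp [takeB]

theorem drainA_eq (hqc HQ : List Int) :
    drainA hqc HQ = (takeB (popSeq hqc)).foldl hqPush HQ :=
  drainA_eq_aux hqc.length hqc HQ le_rfl

theorem hqPush_length (h : List Int) (x : Int) : (hqPush h x).length = h.length + 1 := by
  unfold hqPush
  rw [hqBubbleUp_length]
  simp

theorem popPushLoop_eq_aux : ∀ (n : Nat) (HQ RHQ : List Int), HQ.length ≤ n →
    popPushLoop HQ RHQ =
      ((popSeq HQ).take (20 - RHQ.length)).foldl (fun r x => hqPush r (-|x|)) RHQ := by
  intro n
  induction n with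
  | zero =>
    intro HQ RHQ hn
    have he : HQ = [] := List.length_eq_zero_iff.mp (by omega)
    subst he
    rw [popPushLoop_def, popSeq]
    simp
  | succ n IHn =>
    intro HQ RHQ hn
    rw [popPushLoop_def, popSeq]
    by_cases hh : 0 < HQ.length
    · rw [dif_pos hh]
      by_cases hr : RHQ.length < 20
      · rw [if_pos ⟨hr, hh⟩]
        have htake : (20 - RHQ.length) = (20 - (hqPush RHQ (-|(hqPop HQ).1|)).length) + 1 := by
          rw [hqPush_length]; omega
        rw [htake, List.take_succ_cons, List.foldl_cons]
        exact IHn (hqPop HQ).2 (hqPush RHQ (-|(hqPop HQ).1|)) (by rw [hqPop_length _ hh]; omega)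
      · rw [if_neg (by intro hc; exact hr hc.1)]
        have h20 : 20 - RHQ.length = 0 := by omega
        rw [h20, List.take_zero, List.foldl_nil]
    · rw [if_neg (by intro hc; exact hh hc.2), dif_neg hh]
      simp

theorem popPushLoop_eq (HQ RHQ : List Int) :
    popPushLoop HQ RHQ =
      ((popSeq HQ).take (20 - RHQ.length)).foldl (fun r x => hqPush r (-|x|)) RHQ :=
  popPushLoop_eq_aux HQ.length HQ RHQ le_rfl

theorem foldl_push_spec (s : List Int) :
    ∀ h : List Int, HInv h → HInv (s.foldl hqPush h) ∧ (s.foldl hqPush h).Perm (h ++ s) := by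
  induction s with
  | nil =>
    intro h hi
    refine ⟨hi, ?_⟩
    simp
  | cons x r ih =>
    intro h hi
    rw [List.foldl_cons]
    obtain ⟨p1, p2⟩ := hqPush_spec h x hi
    obtain ⟨q1, q2⟩ := ih (hqPush h x) p1
    refine ⟨q1, q2.trans ?_⟩
    have : (hqPush h x ++ r).Perm ((x :: h) ++ r) := p2.append_right r
    refine this.trans ?_
    have : ((x :: h) ++ r) = x :: (h ++ r) := rfl
    rw [this]
    exact (List.perm_middle).symm

theorem foldl_pushneg_spec (s : List Int) :
    ∀ h : List Int, HInv h → HInv (s.foldl (fun r x => hqPush r (-|x|)) h) := by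
  induction s with
  | nil => intro h hi; simpa using hi
  | cons x r ih =>
    intro h hi
    rw [List.foldl_cons]
    exact ih _ (hqPush_spec h (-|x|) hi).1

theorem push_empty (v : Int) : hqPush [] v = [v] := rfl

theorem heapify_nil : hqHeapify [] = [] := by rfl

-- the per-node equality, by induction on fuel
theorem dfsF_eq_alt (fuel : Nat) :
    ∀ (G : List (List Int)) (X : List Int) (now par : Int),
      dfsF G X fuel now par = dfsAltF G X fuel now par ∧ HInv (dfsF G X fuel now par) := by
  induction fuel with
  | zero => intro G X now par; exact ⟨rfl, hinv_nil⟩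
  | succ fuel IH =>
    intro G X now par
    simp only [dfsF, dfsAltF]
    set v := -(PySem.List.pyGetD X now 0) with hv
    -- the folded loop over G[now]: HQ stays a heap and a permutation of B's vals
    have haux : ∀ (adj : List Int) (HQ vals : List Int), HInv HQ → HQ.Perm vals →
        HInv (adj.foldl (fun HQ nxt => if nxt ≠ par then drainA (dfsF G X fuel nxt now) HQ else HQ) HQ) ∧
        (adj.foldl (fun HQ nxt => if nxt ≠ par then drainA (dfsF G X fuel nxt now) HQ else HQ) HQ).Perm
          (adj.foldl (fun vals nxt => if nxt ≠ par then
              vals ++ takeB (PySem.List.sorted (dfsAltF G X fuel nxt now) (fun x => x) false)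
            else vals) vals) := by
      intro adj
      induction adj with
      | nil => intro HQ vals h1 h2; exact ⟨h1, h2⟩
      | cons nxt rest ihadj =>
        intro HQ vals h1 h2
        rw [List.foldl_cons, List.foldl_cons]
        by_cases hne : nxt ≠ par
        · rw [if_pos hne, if_pos hne]
          obtain ⟨heq, hch⟩ := IH G X nxt now
          have hdrain : drainA (dfsF G X fuel nxt now) HQ =
              (takeB (PySem.List.sorted (dfsAltF G X fuel nxt now) (fun x => x) false)).foldl hqPush HQ := by
            rw [drainA_eq, popSeq_eq_sorted _ hch, heq]
          set s := takeB (PySem.List.sorted (dfsAltF G X fuel nxt now) (fun x => x) false) with hs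
          rw [hdrain]
          obtain ⟨f1, f2⟩ := foldl_push_spec s HQ h1
          exact ihadj (s.foldl hqPush HQ) (vals ++ s) f1 (f2.trans (h2.append_right s))
        · rw [if_neg hne, if_neg hne]
          exact ihadj HQ vals h1 h2
    have hinit : HInv (hqPush (hqHeapify []) v) ∧ (hqPush (hqHeapify []) v).Perm [v] := by
      rw [heapify_nil, push_empty]
      exact ⟨hinv_singleton v, List.Perm.refl _⟩
    obtain ⟨hH, hP⟩ := haux (PySem.List.pyGetD G now []) (hqPush (hqHeapify []) v) [v] hinit.1 hinit.2
    set HQf := (PySem.List.pyGetD G now []).foldl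
      (fun HQ nxt => if nxt ≠ par then drainA (dfsF G X fuel nxt now) HQ else HQ)
      (hqPush (hqHeapify []) v) with hHQf
    set valsf := (PySem.List.pyGetD G now []).foldl
      (fun vals nxt => if nxt ≠ par then
          vals ++ takeB (PySem.List.sorted (dfsAltF G X fuel nxt now) (fun x => x) false)
        else vals) [v] with hvalsf
    have hsorted : popSeq HQf = PySem.List.sorted valsf (fun x => x) false := by
      rw [popSeq_eq_sorted _ hH]
      exact PySem.List.sorted_eq_sorted_of_perm HQf valsf (fun x => x) (fun a b hab => hab) hP
    have hA : popPushLoop HQf [] = ((PySem.List.sorted valsf (fun x => x) false).take 20).foldl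
        (fun r x => hqPush r (-|x|)) [] := by
      rw [popPushLoop_eq, hsorted]
      norm_num
    refine ⟨?_, ?_⟩
    · rw [hA]
      rfl
    · rw [hA]
      exact foldl_pushneg_spec _ [] hinv_nil

-- ===== VERDICT (by name: the statement is the Claim_ definition above) =====
theorem dfs_spec : Claim_equal_dfs := by
  intro G D X now par _hdom _hpre
  unfold Spec_dfs dfs dfs_alt
  exact (dfsF_eq_alt (pvFuel G) G X now par).1
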